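-- pv_equiv track=rewrite | github.com/mrdavearms/bulk-pdf-extractor-and-generator | vcaa_pdf_analyzer.py | _is_sequential
-- ===== SOURCE A (Python) =====
-- from typing import List, Dict, Tuple
--
-- def _is_sequential(items: List[Tuple]) -> bool:
--     """
--     Check if items form a sequential pattern (0, 1, 2, ...).
--
--     Args:
--         items: List of (index, name, widget, page_num) tuples
--
--     Returns:
--         True if indices are sequential
--     """
--     if len(items) < 2:
--         return False
--
--     indices = [item[0] for item in items]
--     indices.sort()
--
--     # Check if indices form a contiguous sequence from any start value
--     start = indices[0]
--     expected = list(range(start, start + len(indices)))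
--     return indices == expected
-- ===== SOURCE B (Python) =====
-- def _is_sequential(items):
--     """Contiguity check without sorting: one pass for min/max plus a set for distinctness."""
--     if len(items) < 2:
--         return False
--     indices = [item[0] for item in items]
--     return len(set(indices)) == len(indices) and max(indices) - min(indices) == len(indices) - 1
-- ===== Notes on version B (the rewrite author's own statement) =====
-- stated objective: simpler
-- what changed: Replaces sort-and-compare-to-range(start,start+n) with a sortless one-liner: distinctness via a set plus max-min == n-1; O(n) instead of O(n log n), though a timing run could not measure a difference at the tested sizes.
import Mathlib
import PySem

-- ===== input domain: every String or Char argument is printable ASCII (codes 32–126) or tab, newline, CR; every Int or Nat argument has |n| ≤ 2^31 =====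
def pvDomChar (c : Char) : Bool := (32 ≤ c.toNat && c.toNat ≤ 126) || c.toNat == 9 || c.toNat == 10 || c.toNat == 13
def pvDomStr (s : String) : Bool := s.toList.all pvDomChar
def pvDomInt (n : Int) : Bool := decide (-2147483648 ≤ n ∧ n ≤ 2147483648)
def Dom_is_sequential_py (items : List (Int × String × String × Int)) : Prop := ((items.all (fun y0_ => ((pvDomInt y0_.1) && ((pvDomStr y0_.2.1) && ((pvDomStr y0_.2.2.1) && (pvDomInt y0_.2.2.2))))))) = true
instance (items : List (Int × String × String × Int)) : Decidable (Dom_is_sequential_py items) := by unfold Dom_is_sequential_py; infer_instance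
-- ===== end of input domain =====

-- B replaces A's sort-and-compare-to-range with a sortless distinctness + max-min span check (simpler; avoids sorting).

-- ===== PORT A =====
def is_sequential_py (items : List (Int × String × String × Int)) : Bool :=
  if items.length < 2 then false
  else
    let indices := items.map (fun item => item.1)
    let indices := PySem.List.sorted indices (fun y => y) false
    let start := PySem.List.pyGetD indices 0 0          -- indices[0]; the list is nonempty under the guard
    let expected := PySem.List.pyRange start (start + (indices.length : Int)) 1
    decide (indices = expected)

-- ===== PORT B =====
def is_sequential_py_alt (items : List (Int × String × String × Int)) : Bool :=
  if items.length < 2 then false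
  else
    let indices := items.map (fun item => item.1)
    (decide (PySem.Set.len (PySem.Set.ofList indices) = (indices.length : Int))) &&
    (match PySem.List.max? indices (fun y => y), PySem.List.min? indices (fun y => y) with
     | some hi, some lo => decide (hi - lo = (indices.length : Int) - 1)
     | _, _ => false)          -- unreachable: the list is nonempty under the guard

-- ===== PRECONDITION & SPEC =====
def Spec_is_sequential_py (items : List (Int × String × String × Int)) (out : Bool) : Prop := out = is_sequential_py_alt items
instance (items : List (Int × String × String × Int)) (out : Bool) : Decidable (Spec_is_sequential_py items out) := by unfold Spec_is_sequential_py; infer_instance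

-- ===== CLAIM (what is proved, stated in full; the proofs are below) =====
def Claim_equal_is_sequential_py : Prop := ∀ (items : List (Int × String × String × Int)), Dom_is_sequential_py items → Spec_is_sequential_py items (is_sequential_py items)

-- ===== LEMMAS AND PROOFS =====

-- set(xs) has as many elements as xs iff xs has no duplicates
theorem pv_len_ofList_eq_iff (xs : List Int) :
    (PySem.Set.len (PySem.Set.ofList xs) = (xs.length : Int)) ↔ xs.Nodup := by
  constructor
  · intro h
    have hlen : (PySem.Set.ofList xs).length = xs.length := by
      have := h
      simp [PySem.Set.len] at this
      exact_mod_cast this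
    have hsub : (PySem.Set.ofList xs) ⊆ xs := fun a ha => (PySem.Set.mem_ofList xs a).mp ha
    have hperm : (PySem.Set.ofList xs).Perm xs :=
      ((PySem.Set.nodup_ofList xs).subperm hsub).perm_of_length_le (le_of_eq hlen.symm)
    exact hperm.nodup_iff.mp (PySem.Set.nodup_ofList xs)
  · intro h
    rw [PySem.Set.ofList_eq_self_of_nodup xs h]
    simp [PySem.Set.len]

-- if xs is duplicate-free and its span is length-1, sorted(xs) IS the contiguous range
theorem pv_sorted_eq_range (xs : List Int) (lo hi : Int)
    (hlo : PySem.List.min? xs (fun y => y) = some lo)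
    (hhi : PySem.List.max? xs (fun y => y) = some hi)
    (hnd : xs.Nodup)
    (hspan : hi - lo = (xs.length : Int) - 1) :
    PySem.List.sorted xs (fun y => y) false = PySem.List.pyRange lo (lo + (xs.length : Int)) 1 := by
  apply PySem.List.sorted_eq_of_perm_of_pairwise_lt
  · rw [List.perm_ext_iff_of_nodup (PySem.List.nodup_pyRange_one _ _) hnd]
    intro a
    rw [PySem.List.mem_pyRange_one]
    have hsub : xs.toFinset ⊆ Finset.Icc lo hi := by
      intro b hb
      rw [Finset.mem_Icc]
      have hbmem := List.mem_toFinset.mp hb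
      exact ⟨PySem.List.min?_isMin hlo b hbmem, PySem.List.max?_isMax hhi b hbmem⟩
    have hcard : (Finset.Icc lo hi).card ≤ xs.toFinset.card := by
      rw [Int.card_Icc, List.toFinset_card_of_nodup hnd]
      omega
    have heq := Finset.eq_of_subset_of_card_le hsub hcard
    constructor
    · intro ⟨h1, h2⟩
      have : a ∈ xs.toFinset := by
        rw [heq, Finset.mem_Icc]; omega
      exact List.mem_toFinset.mp this
    · intro ha
      have h1 := PySem.List.min?_isMin hlo a ha
      have h2 := PySem.List.max?_isMax hhi a ha
      simp only at h1 h2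
      omega
  · exact PySem.List.pairwise_lt_pyRange_one _ _

-- if sorted(xs) equals a contiguous range of its own length, xs is duplicate-free with span length-1
theorem pv_range_implies (xs : List Int) (lo hi s0 : Int)
    (hlo : PySem.List.min? xs (fun y => y) = some lo)
    (hhi : PySem.List.max? xs (fun y => y) = some hi)
    (h1 : 1 ≤ xs.length)
    (heq : PySem.List.sorted xs (fun y => y) false = PySem.List.pyRange s0 (s0 + (xs.length : Int)) 1) :
    xs.Nodup ∧ hi - lo = (xs.length : Int) - 1 := by
  have hperm : (PySem.List.sorted xs (fun y => y) false).Perm xs := PySem.List.sorted_perm xs _ _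
  have hnd : xs.Nodup := by
    rw [heq] at hperm
    exact hperm.nodup_iff.mp (PySem.List.nodup_pyRange_one _ _)
  refine ⟨hnd, ?_⟩
  have hmem : ∀ a : Int, a ∈ xs ↔ (s0 ≤ a ∧ a < s0 + (xs.length : Int)) := by
    intro a
    rw [← PySem.List.mem_pyRange_one, ← heq]
    exact (hperm.mem_iff).symm
  have hlomem := PySem.List.min?_mem hlo
  have hhimem := PySem.List.max?_mem hhi
  have hs0 : s0 ∈ xs := by
    rw [hmem]; omega
  have h2 : s0 + (xs.length : Int) - 1 ∈ xs := by
    rw [hmem]; omega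
  have b1 := (hmem lo).mp hlomem
  have b2 := (hmem hi).mp hhimem
  have b3 := PySem.List.min?_isMin hlo _ hs0
  have b4 := PySem.List.max?_isMax hhi _ h2
  simp only at b3 b4
  omega

-- ===== VERDICT (by name: the statement is the Claim_ definition above) =====
theorem is_sequential_py_spec : Claim_equal_is_sequential_py := by
  intro items _
  unfold Spec_is_sequential_py is_sequential_py is_sequential_py_alt
  by_cases hlt : items.length < 2
  · simp [hlt]
  · simp only [hlt, if_false]
    set xs := items.map (fun item => item.1) with hxs
    have hn : 2 ≤ xs.length := by
      rw [hxs, List.length_map]; omega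
    have hne : xs ≠ [] := by
      intro h; rw [h] at hn; simp at hn
    obtain ⟨lo, hlo⟩ : ∃ lo, PySem.List.min? xs (fun y => y) = some lo := by
      cases h : PySem.List.min? xs (fun y => y) with
      | none => exact absurd ((PySem.List.min?_eq_none_iff xs _).mp h) hne
      | some m => exact ⟨m, rfl⟩
    obtain ⟨hi, hhi⟩ : ∃ hi, PySem.List.max? xs (fun y => y) = some hi := by
      cases h : PySem.List.max? xs (fun y => y) with
      | none => exact absurd ((PySem.List.max?_eq_none_iff xs _).mp h) hne
      | some m => exact ⟨m, rfl⟩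
    simp only [hlo, hhi]
    have hslen : (PySem.List.sorted xs (fun y => y) false).length = xs.length :=
      PySem.List.length_sorted xs _ _
    by_cases hnd : xs.Nodup
    · rw [decide_eq_true ((pv_len_ofList_eq_iff xs).mpr hnd), Bool.true_and]
      by_cases hspan : hi - lo = (xs.length : Int) - 1
      · have hs := pv_sorted_eq_range xs lo hi hlo hhi hnd hspan
        have hcons : PySem.List.pyRange lo (lo + (xs.length : Int)) 1
            = lo :: PySem.List.pyRange (lo + 1) (lo + (xs.length : Int)) 1 :=
          PySem.List.pyRange_one_cons (by omega)
        have hget : PySem.List.pyGetD (PySem.List.sorted xs (fun y => y) false) 0 0 = lo := by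
          rw [hs, hcons]
          simp [PySem.List.pyGetD, PySem.List.pyGet?, PySem.List.pyIdx?]
        rw [hget, hslen, decide_eq_true hspan, decide_eq_true_eq]
        rw [hs]
      · rw [decide_eq_false hspan]
        rw [decide_eq_false_iff_not]
        intro heq
        rw [hslen] at heq
        exact hspan (pv_range_implies xs lo hi _ hlo hhi (by omega) heq).2
    · have h1 : PySem.Set.len (PySem.Set.ofList xs) ≠ (xs.length : Int) := by
        intro h; exact hnd ((pv_len_ofList_eq_iff xs).mp h)
      rw [decide_eq_false h1, Bool.false_and, decide_eq_false_iff_not]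
      intro heq
      have hperm : (PySem.List.sorted xs (fun y => y) false).Perm xs := PySem.List.sorted_perm xs _ _
      rw [heq] at hperm
      exact hnd (hperm.nodup_iff.mp (PySem.List.nodup_pyRange_one _ _))
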